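-- pv_equiv track=rewrite | github.com/XyzHuy/-DL-Fine-tuning-coding-model | data/solution/Solution755.py | pourWater
-- ===== SOURCE A (Python) =====
-- from typing import List
--
-- def pourWater(heights: List[int], volume: int, k: int) -> List[int]:
--     n = len(heights)
--
--     for _ in range(volume):
--         # Try to move left
--         left = k
--         while left > 0 and heights[left - 1] <= heights[left]:
--             left -= 1
--         while left < n - 1 and heights[left + 1] == heights[left]:
--             left += 1
--
--         if left < k:
--             heights[left] += 1
--             continue
--
--         # Try to move right
--         right = k
--         while right < n - 1 and heights[right + 1] <= heights[right]:
--             right += 1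
--         while right > 0 and heights[right - 1] == heights[right]:
--             right -= 1
--
--         if right > k:
--             heights[right] += 1
--             continue
--
--         # Stay at the current position
--         heights[k] += 1
--
--     return heights
-- ===== SOURCE B (Python) =====
-- from typing import List
--
-- def pourWater(heights: List[int], volume: int, k: int) -> List[int]:
--     # Single scan per side tracking the lowest reachable cell ('best'),
--     # deciding by height comparison instead of A's separate plateau walk-back.
--     # Mutates heights in place, like the original.
--     n = len(heights)
--     for _ in range(volume):
--         best = k
--         i = k
--         while i > 0 and heights[i - 1] <= heights[i]:
--             i -= 1
--             if heights[i] < heights[best]: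
--                 best = i
--         if heights[best] < heights[k]:
--             heights[best] += 1
--             continue
--         best = k
--         i = k
--         while i < n - 1 and heights[i + 1] <= heights[i]:
--             i += 1
--             if heights[i] < heights[best]:
--                 best = i
--         heights[best] += 1
--     return heights
-- ===== Notes on version B (the rewrite author's own statement) =====
-- stated objective: simpler
-- what changed: Each drop's resting cell is found by one directional scan per side that tracks the lowest cell seen so far ('best') and decides by a height comparison, replacing A's four while-loops (walk-down plus plateau walk-back on each side) and its index-based left<k / right>k tests; the stay-at-k case merges into the right-side branch.
-- outside the precondition, e.g. on pourWater([3, 0, 1], 4, -3): A returns [3, 2, 3], B returns [3, 3, 2]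
import Mathlib
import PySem

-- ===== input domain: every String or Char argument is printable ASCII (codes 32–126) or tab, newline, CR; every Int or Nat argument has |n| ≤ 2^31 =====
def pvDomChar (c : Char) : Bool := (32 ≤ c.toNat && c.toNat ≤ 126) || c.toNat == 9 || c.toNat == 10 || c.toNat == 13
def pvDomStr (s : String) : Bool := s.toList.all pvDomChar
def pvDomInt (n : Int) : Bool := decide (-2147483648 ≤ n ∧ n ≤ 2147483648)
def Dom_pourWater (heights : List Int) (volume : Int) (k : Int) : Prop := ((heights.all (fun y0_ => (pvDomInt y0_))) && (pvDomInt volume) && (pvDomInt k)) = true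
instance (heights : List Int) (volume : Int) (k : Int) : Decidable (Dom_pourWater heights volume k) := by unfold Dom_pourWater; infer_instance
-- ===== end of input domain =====

-- B replaces A's four while-loops per drop (walk-down + plateau walk-back on each side,
-- decided by index tests) with a single scan per side that tracks the lowest cell seen,
-- decided by a height comparison: a simpler decomposition, same cost.  Like A, the Python B
-- mutates `heights` in place; the equivalence proved here is about the return value.

-- ===== PORT A =====
-- heights[i] for the in-range indices reached inside Pre_ (negative/out-of-range k excluded by Pre_)
def pyAt (h : List Int) (i : Int) : Int := h.getD i.toNat 0

-- heights[i] += 1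
def bump (h : List Int) (i : Int) : List Int := h.set i.toNat (pyAt h i + 1)

-- while left > 0 and heights[left-1] <= heights[left]: left -= 1   (fuel ≥ number of steps inside Pre_)
def aDownL (h : List Int) : Nat → Int → Int
  | 0, left => left
  | f+1, left =>
    if left > 0 ∧ pyAt h (left-1) ≤ pyAt h left then aDownL h f (left-1) else left

-- while left < n-1 and heights[left+1] == heights[left]: left += 1
def aPlatR (h : List Int) : Nat → Int → Int
  | 0, left => left
  | f+1, left =>
    if left < (h.length : Int) - 1 ∧ pyAt h (left+1) = pyAt h left then aPlatR h f (left+1) else left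

-- while right < n-1 and heights[right+1] <= heights[right]: right += 1
def aDownR (h : List Int) : Nat → Int → Int
  | 0, right => right
  | f+1, right =>
    if right < (h.length : Int) - 1 ∧ pyAt h (right+1) ≤ pyAt h right then aDownR h f (right+1) else right

-- while right > 0 and heights[right-1] == heights[right]: right -= 1
def aPlatL (h : List Int) : Nat → Int → Int
  | 0, right => right
  | f+1, right =>
    if right > 0 ∧ pyAt h (right-1) = pyAt h right then aPlatL h f (right-1) else right

-- one iteration of A's `for _ in range(volume)` body
def aStep (h : List Int) (k : Int) : List Int :=
  let left := aPlatR h h.length (aDownL h h.length k)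
  if left < k then bump h left
  else
    let right := aPlatL h h.length (aDownR h h.length k)
    if right > k then bump h right
    else bump h k

def aLoop (k : Int) : Nat → List Int → List Int
  | 0, h => h
  | v+1, h => aLoop k v (aStep h k)

def pourWater (heights : List Int) (volume : Int) (k : Int) : List Int :=
  aLoop k volume.toNat heights

-- ===== PORT B =====
-- while i > 0 and heights[i-1] <= heights[i]: i -= 1; if heights[i] < heights[best]: best = i
def bScanL (h : List Int) : Nat → Int → Int → Int
  | 0, _, best => best
  | f+1, i, best =>
    if i > 0 ∧ pyAt h (i-1) ≤ pyAt h i then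
      bScanL h f (i-1) (if pyAt h (i-1) < pyAt h best then i-1 else best)
    else best

-- while i < n-1 and heights[i+1] <= heights[i]: i += 1; if heights[i] < heights[best]: best = i
def bScanR (h : List Int) : Nat → Int → Int → Int
  | 0, _, best => best
  | f+1, i, best =>
    if i < (h.length : Int) - 1 ∧ pyAt h (i+1) ≤ pyAt h i then
      bScanR h f (i+1) (if pyAt h (i+1) < pyAt h best then i+1 else best)
    else best

-- one iteration of B's loop body
def bStep (h : List Int) (k : Int) : List Int :=
  let best := bScanL h h.length k k
  if pyAt h best < pyAt h k then bump h best
  else bump h (bScanR h h.length k k)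

def bLoop (k : Int) : Nat → List Int → List Int
  | 0, h => h
  | v+1, h => bLoop k v (bStep h k)

def pourWater_alt (heights : List Int) (volume : Int) (k : Int) : List Int :=
  bLoop k volume.toNat heights

-- ===== PRECONDITION & SPEC =====
-- Pre_ restricts to the problem's natural domain 0 ≤ k < len(heights) whenever any drop is
-- poured (volume > 0): outside it A raises IndexError (k ≥ n or k < -n), or, for -n ≤ k < 0,
-- returns a value arising from Python's negative-index wraparound mixed with raw-index loop
-- bounds — an accident of A's implementation on inputs the problem excludes.
def Pre_pourWater (heights : List Int) (volume : Int) (k : Int) : Prop :=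
  volume ≤ 0 ∨ (0 ≤ k ∧ k < (heights.length : Int))
instance (heights : List Int) (volume : Int) (k : Int) : Decidable (Pre_pourWater heights volume k) := by unfold Pre_pourWater; infer_instance
def pvWitness_pourWater : List Int × Int × Int := ([1, 2, 1], 2, 1)

def Spec_pourWater (heights : List Int) (volume : Int) (k : Int) (out : List Int) : Prop := out = pourWater_alt heights volume k
instance (heights : List Int) (volume : Int) (k : Int) (out : List Int) : Decidable (Spec_pourWater heights volume k out) := by unfold Spec_pourWater; infer_instance

-- ===== CLAIM (what is proved, stated in full; the proofs are below) =====
def Claim_equal_pourWater : Prop := ∀ (heights : List Int) (volume : Int) (k : Int), Dom_pourWater heights volume k → Pre_pourWater heights volume k → Spec_pourWater heights volume k (pourWater heights volume k)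

-- ===== LEMMAS AND PROOFS =====

theorem aPlatR_ge_self (h : List Int) : ∀ (f : Nat) (i : Int), i ≤ aPlatR h f i := by
  intro f
  induction f with
  | zero => intro i; simp [aPlatR]
  | succ f ih =>
    intro i
    simp only [aPlatR]
    split
    · exact le_trans (by omega) (ih (i+1))
    · exact le_rfl

theorem aPlatL_le_self (h : List Int) : ∀ (f : Nat) (i : Int), aPlatL h f i ≤ i := by
  intro f
  induction f with
  | zero => intro i; simp [aPlatL]
  | succ f ih =>
    intro i
    simp only [aPlatL]
    split
    · exact le_trans (ih (i-1)) (by omega)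
    · exact le_rfl

theorem platR_exact (h : List Int) :
    ∀ (f : Nat) (i b : Int), 0 ≤ i → i ≤ b → b < (h.length : Int) - 1 → (b - i).toNat < f →
    (∀ t : Int, i ≤ t → t ≤ b → pyAt h t = pyAt h i) →
    pyAt h b < pyAt h (b+1) →
    aPlatR h f i = b := by
  intro f
  induction f with
  | zero => intro i b _ _ _ hf _ _; omega
  | succ f ih =>
    intro i b h0 hib hbn hf heq hstrict
    rcases eq_or_lt_of_le hib with rfl | hlt
    · simp only [aPlatR]
      rw [if_neg]
      rintro ⟨-, he⟩
      exact absurd he.symm (ne_of_lt hstrict)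
    · simp only [aPlatR]
      rw [if_pos ⟨by omega, by rw [heq (i+1) (by omega) (by omega)]⟩]
      exact ih (i+1) b (by omega) (by omega) hbn (by omega)
        (fun t h1 h2 => by rw [heq t (by omega) h2, heq (i+1) (by omega) (by omega)]) hstrict

theorem platR_ge (h : List Int) :
    ∀ (f : Nat) (i b : Int), 0 ≤ i → i ≤ b → b ≤ (h.length : Int) - 1 → (b - i).toNat < f →
    (∀ t : Int, i ≤ t → t ≤ b → pyAt h t = pyAt h i) →
    b ≤ aPlatR h f i := by
  intro f
  induction f with
  | zero => intro i b _ _ _ hf _; omega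
  | succ f ih =>
    intro i b h0 hib hbn hf heq
    rcases eq_or_lt_of_le hib with rfl | hlt
    · exact aPlatR_ge_self h (f+1) i
    · simp only [aPlatR]
      rw [if_pos ⟨by omega, by rw [heq (i+1) (by omega) (by omega)]⟩]
      exact ih (i+1) b (by omega) (by omega) hbn (by omega)
        (fun t h1 h2 => by rw [heq t (by omega) h2, heq (i+1) (by omega) (by omega)])

theorem platL_exact (h : List Int) :
    ∀ (f : Nat) (i b : Int), 0 < b → b ≤ i → (i - b).toNat < f →
    (∀ t : Int, b ≤ t → t ≤ i → pyAt h t = pyAt h i) →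
    pyAt h b < pyAt h (b-1) →
    aPlatL h f i = b := by
  intro f
  induction f with
  | zero => intro i b _ _ hf _ _; omega
  | succ f ih =>
    intro i b h0 hbi hf heq hstrict
    rcases eq_or_lt_of_le hbi with rfl | hlt
    · simp only [aPlatL]
      rw [if_neg]
      rintro ⟨-, he⟩
      exact absurd he (ne_of_gt hstrict)
    · simp only [aPlatL]
      rw [if_pos ⟨by omega, by rw [heq (i-1) (by omega) (by omega)]⟩]
      exact ih (i-1) b h0 (by omega) (by omega)
        (fun t h1 h2 => by rw [heq t h1 (by omega), heq (i-1) (by omega) (by omega)]) hstrict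

theorem platL_le (h : List Int) :
    ∀ (f : Nat) (i b : Int), 0 ≤ b → b ≤ i → (i - b).toNat < f →
    (∀ t : Int, b ≤ t → t ≤ i → pyAt h t = pyAt h i) →
    aPlatL h f i ≤ b := by
  intro f
  induction f with
  | zero => intro i b _ _ hf _; omega
  | succ f ih =>
    intro i b h0 hbi hf heq
    rcases eq_or_lt_of_le hbi with rfl | hlt
    · exact aPlatL_le_self h (f+1) b
    · simp only [aPlatL]
      rw [if_pos ⟨by omega, by rw [heq (i-1) (by omega) (by omega)]⟩]
      exact ih (i-1) b h0 (by omega) (by omega)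
        (fun t h1 h2 => by rw [heq t h1 (by omega), heq (i-1) (by omega) (by omega)])


theorem left_main (h : List Int) (k : Int) :
    ∀ (f : Nat) (i best : Int), 0 ≤ i → i.toNat < f → i ≤ best → best ≤ k →
    (∀ t : Int, i ≤ t → t ≤ best → pyAt h t = pyAt h i) →
    (best < k → pyAt h best < pyAt h (best+1)) →
    (∀ t : Int, i < t → t ≤ k → pyAt h (t-1) ≤ pyAt h t) →
    ∃ j b : Int, aDownL h f i = j ∧ bScanL h f i best = b ∧
      0 ≤ j ∧ j ≤ b ∧ b ≤ k ∧
      (∀ t : Int, j ≤ t → t ≤ b → pyAt h t = pyAt h j) ∧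
      (b < k → pyAt h b < pyAt h (b+1)) ∧
      (∀ t : Int, j < t → t ≤ k → pyAt h (t-1) ≤ pyAt h t) ∧
      ¬(j > 0 ∧ pyAt h (j-1) ≤ pyAt h j) := by
  intro f
  induction f with
  | zero => intro i best h0 hf; omega
  | succ f ih =>
    intro i best h0 hf hib hbk heq hstrict hmono
    by_cases hg : i > 0 ∧ pyAt h (i-1) ≤ pyAt h i
    · have hbe : pyAt h best = pyAt h i := heq best hib le_rfl
      have hmono' : ∀ t : Int, i-1 < t → t ≤ k → pyAt h (t-1) ≤ pyAt h t := by
        intro t h1 h2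
        rcases eq_or_lt_of_le (show i ≤ t by omega) with rfl | hlt
        · exact hg.2
        · exact hmono t hlt h2
      simp only [aDownL, bScanL, if_pos hg]
      by_cases hlt : pyAt h (i-1) < pyAt h best
      · rw [if_pos hlt]
        have hlti : pyAt h (i-1) < pyAt h i := hbe ▸ hlt
        refine ih (i-1) (i-1) (by omega) (by omega) le_rfl (by omega)
          (fun t h1 h2 => congrArg (pyAt h) (show t = i - 1 by omega)) ?_ hmono'
        intro _
        have e : i - 1 + 1 = i := by omega
        rw [e]
        exact hlti
      · rw [if_neg hlt]
        have heqi : pyAt h (i-1) = pyAt h i := le_antisymm hg.2 (by rw [← hbe]; omega)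
        refine ih (i-1) best (by omega) (by omega) (by omega) hbk ?_ hstrict hmono'
        intro t h1 h2
        rcases eq_or_lt_of_le h1 with rfl | hlt2
        · rfl
        · rw [heq t (by omega) h2, ← heqi]
    · simp only [aDownL, bScanL, if_neg hg]
      exact ⟨i, best, rfl, rfl, h0, hib, hbk, heq, hstrict, hmono, hg⟩

theorem right_main (h : List Int) (k : Int) :
    ∀ (f : Nat) (i best : Int), k ≤ best → ((h.length : Int) - 1 - i).toNat < f →
    best ≤ i → i ≤ (h.length : Int) - 1 →
    (∀ t : Int, best ≤ t → t ≤ i → pyAt h t = pyAt h i) →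
    (k < best → pyAt h best < pyAt h (best-1)) →
    (∀ t : Int, k ≤ t → t < i → pyAt h (t+1) ≤ pyAt h t) →
    ∃ j b : Int, aDownR h f i = j ∧ bScanR h f i best = b ∧
      j ≤ (h.length : Int) - 1 ∧ b ≤ j ∧ k ≤ b ∧
      (∀ t : Int, b ≤ t → t ≤ j → pyAt h t = pyAt h j) ∧
      (k < b → pyAt h b < pyAt h (b-1)) ∧
      (∀ t : Int, k ≤ t → t < j → pyAt h (t+1) ≤ pyAt h t) ∧
      ¬(j < (h.length : Int) - 1 ∧ pyAt h (j+1) ≤ pyAt h j) := by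
  intro f
  induction f with
  | zero => intro i best _ hf _ hin; omega
  | succ f ih =>
    intro i best hkb hf hbi hin heq hstrict hmono
    by_cases hg : i < (h.length : Int) - 1 ∧ pyAt h (i+1) ≤ pyAt h i
    · have hbe : pyAt h best = pyAt h i := heq best le_rfl hbi
      have hmono' : ∀ t : Int, k ≤ t → t < i+1 → pyAt h (t+1) ≤ pyAt h t := by
        intro t h1 h2
        rcases eq_or_lt_of_le (show t ≤ i by omega) with rfl | hlt
        · exact hg.2
        · exact hmono t h1 hlt
      simp only [aDownR, bScanR, if_pos hg]
      by_cases hlt : pyAt h (i+1) < pyAt h best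
      · rw [if_pos hlt]
        have hlti : pyAt h (i+1) < pyAt h i := hbe ▸ hlt
        refine ih (i+1) (i+1) (by omega) (by omega) le_rfl hg.1
          (fun t h1 h2 => congrArg (pyAt h) (show t = i + 1 by omega)) ?_ hmono'
        intro _
        have e : i + 1 - 1 = i := by omega
        rw [e]
        exact hlti
      · rw [if_neg hlt]
        have heqi : pyAt h (i+1) = pyAt h i := le_antisymm hg.2 (by rw [← hbe]; omega)
        refine ih (i+1) best (by omega) (by omega) (by omega) hg.1 ?_ hstrict hmono'
        intro t h1 h2
        rcases eq_or_lt_of_le h2 with rfl | hlt2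
        · rfl
        · rw [heq t h1 (by omega), ← heqi]
    · simp only [aDownR, bScanR, if_neg hg]
      exact ⟨i, best, rfl, rfl, hin, hbi, hkb, heq, hstrict, hmono, hg⟩

theorem chain_up (h : List Int) (k lo : Int)
    (hmono : ∀ t : Int, lo < t → t ≤ k → pyAt h (t-1) ≤ pyAt h t) :
    ∀ s t : Int, lo ≤ s → s ≤ t → t ≤ k → pyAt h s ≤ pyAt h t := by
  intro s t hs hst
  refine Int.le_induction (m := s) ?_ ?_ t hst
  · intro _; exact le_rfl
  · intro n hn ihp hk
    have h1 : pyAt h n ≤ pyAt h (n+1) := by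
      have := hmono (n+1) (by omega) hk
      simpa using this
    exact le_trans (ihp (by omega)) h1


theorem step_eq (h : List Int) (k : Int) (hk0 : 0 ≤ k) (hkn : k < (h.length : Int)) :
    aStep h k = bStep h k := by
  obtain ⟨j, b, hA, hB, hj0, hjb, hbk, heq, hstrict, hmono, -⟩ :=
    left_main h k h.length k k hk0 (by omega) le_rfl le_rfl
      (fun t h1 h2 => congrArg (pyAt h) (by omega)) (by omega)
      (by intro t h1 h2; omega)
  show (if aPlatR h h.length (aDownL h h.length k) < k then
          bump h (aPlatR h h.length (aDownL h h.length k))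
        else if aPlatL h h.length (aDownR h h.length k) > k then
          bump h (aPlatL h h.length (aDownR h h.length k))
        else bump h k) =
       (if pyAt h (bScanL h h.length k k) < pyAt h k then bump h (bScanL h h.length k k)
        else bump h (bScanR h h.length k k))
  rw [hA, hB]
  rcases eq_or_lt_of_le hbk with rfl | hblt
  · -- b = k : no pour on the left for either program (k has been renamed to b)
    have hge : b ≤ aPlatR h h.length j :=
      platR_ge h h.length j b hj0 hjb (by omega) (by omega) heq
    rw [if_neg (show ¬ aPlatR h h.length j < b by omega),
        if_neg (show ¬ pyAt h b < pyAt h b by omega)]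
    -- right side
    obtain ⟨j', b', hA', hB', hj'n, hb'j', hkb', heq', hstrict', hmono', -⟩ :=
      right_main h b h.length b b le_rfl (by omega) le_rfl (by omega)
        (fun t h1 h2 => congrArg (pyAt h) (by omega)) (by omega)
        (by intro t h1 h2; omega)
    rw [hA', hB']
    rcases eq_or_lt_of_le hkb' with rfl | hblt'
    · have hle : aPlatL h h.length j' ≤ b :=
        platL_le h h.length j' b (by omega) hb'j' (by omega) heq'
      rw [if_neg (show ¬ aPlatL h h.length j' > b by omega)]
    · have hexact : aPlatL h h.length j' = b' :=
        platL_exact h h.length j' b' (by omega) hb'j' (by omega) heq' (hstrict' hblt')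
      rw [hexact, if_pos (show b' > b by omega)]
  · -- b < k : both pour at b on the left
    have hexact : aPlatR h h.length j = b :=
      platR_exact h h.length j b hj0 hjb (by omega) (by omega) heq (hstrict hblt)
    have hbK : pyAt h b < pyAt h k := by
      have h1 : pyAt h (b+1) ≤ pyAt h k :=
        chain_up h k j hmono (b+1) k (by omega) (by omega) le_rfl
      exact lt_of_lt_of_le (hstrict hblt) h1
    rw [hexact, if_pos hblt, if_pos hbK]

theorem loop_eq (k : Int) : ∀ (v : Nat) (h : List Int), 0 ≤ k → k < (h.length : Int) →
    aLoop k v h = bLoop k v h := by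
  intro v
  induction v with
  | zero => intro h _ _; rfl
  | succ v ih =>
    intro h hk0 hkn
    show aLoop k v (aStep h k) = bLoop k v (bStep h k)
    rw [step_eq h k hk0 hkn]
    apply ih
    · exact hk0
    · have : (bStep h k).length = h.length := by
        show (if pyAt h (bScanL h h.length k k) < pyAt h k then bump h (bScanL h h.length k k)
              else bump h (bScanR h h.length k k)).length = h.length
        split <;> simp [bump]
      rw [this]
      exact hkn

-- ===== VERDICT (by name: the statement is the Claim_ definition above) =====
theorem pourWater_spec : Claim_equal_pourWater := by
  intro heights volume k _ hpre
  unfold Spec_pourWater pourWater pourWater_alt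
  rcases hpre with hv | ⟨hk0, hkn⟩
  · have hz : volume.toNat = 0 := Int.toNat_of_nonpos hv
    rw [hz]
    rfl
  · exact loop_eq k volume.toNat heights hk0 hkn
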